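-- pv_equiv track=rewrite | github.com/ModPunchtree/URCLBot | genericURCLOptimiser/genericURCLOptimiser.py | POPPSH
-- ===== SOURCE A (Python) =====
-- def POPPSH(code: list) -> list:
--     for i, j in enumerate(code):
--         if i == len(code) - 1:
--             break
--         if j.startswith("POP") and code[i + 1].startswith("PSH"):
--             code[i] = "LOD " + j[j.index(" ") + 1: ] + ", SP"
--             code[i + 1] = "STR SP, " + code[i + 1][code[i + 1].index(" ") + 1: ]
--             return POPPSH(code)
--     return code
-- ===== SOURCE B (Python) =====
-- # One forward pass carrying the previous not-yet-emitted line (and its cached "POP" test)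
-- # instead of A's replace-and-restart recursion. Builds a new list; equivalence is about the
-- # return value (A mutates its argument in place).
-- def POPPSH(code: list) -> list:
--     out = []
--     append = out.append
--     pending = None
--     pending_pop = False
--     for s in code:
--         if pending_pop and s.startswith("PSH"):
--             append("LOD " + pending[pending.index(" ") + 1:] + ", SP")
--             append("STR SP, " + s[s.index(" ") + 1:])
--             pending = None
--             pending_pop = False
--         else:
--             if pending is not None:
--                 append(pending)
--             pending = s
--             pending_pop = s.startswith("POP")
--     if pending is not None:
--         append(pending)
--     return out
-- ===== Notes on version B (the rewrite author's own statement) =====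
-- stated objective: alternative
-- what changed: A finds the leftmost POP/PSH pair, rewrites it and recursively rescans the whole list from the start; B makes one forward pass carrying the pending previous line and its cached startswith('POP') test, emitting the LOD/STR pair and clearing the pending slot on a match.
import Mathlib
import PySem

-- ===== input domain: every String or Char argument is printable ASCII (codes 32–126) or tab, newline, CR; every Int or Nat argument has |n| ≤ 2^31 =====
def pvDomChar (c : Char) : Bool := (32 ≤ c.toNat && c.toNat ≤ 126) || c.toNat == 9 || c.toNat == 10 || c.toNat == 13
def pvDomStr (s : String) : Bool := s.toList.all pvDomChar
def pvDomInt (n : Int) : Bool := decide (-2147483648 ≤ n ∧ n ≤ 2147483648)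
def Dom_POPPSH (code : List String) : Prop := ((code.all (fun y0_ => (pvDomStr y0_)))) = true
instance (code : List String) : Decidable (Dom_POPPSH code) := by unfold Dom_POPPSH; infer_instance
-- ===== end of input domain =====

-- B replaces A's find-first-match-then-restart recursion by one forward pass carrying the
-- previous line; equivalence is about the return value only (the Python A mutates its
-- argument in place, B builds a new list).

-- ===== PORT A =====
-- "LOD " + j[j.index(" ") + 1:] + ", SP"   (ported with find; exact under Pre_, where " " occurs in j so find = index)
def pvLod (j : String) : String :=
  "LOD " ++ PySem.Str.slice j (some (PySem.Str.find j " " + 1)) none ++ ", SP"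
-- "STR SP, " + j[j.index(" ") + 1:]   (ported with find; exact under Pre_, where " " occurs in j)
def pvStr (j : String) : String :=
  "STR SP, " ++ PySem.Str.slice j (some (PySem.Str.find j " " + 1)) none
-- A's for-loop: scan adjacent pairs left to right (the 'break' at the last index = no pair left);
-- on the first POP/PSH pair return the list with the two in-place assignments done, else none.
def pvScanA : List String → Option (List String)
  | [] => none
  | [_] => none
  | x :: y :: rest =>
    if PySem.Str.startswith x "POP" && PySem.Str.startswith y "PSH" then
      some (pvLod x :: pvStr y :: rest)
    else (pvScanA (y :: rest)).map (x :: ·)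
-- A's 'return POPPSH(code)' self-recursion; each replacement removes a "POP"-prefixed element,
-- so length+1 fuel is enough (proved in pvGoA_eq_alt / POPPSH_spec below).
def pvGoA : Nat → List String → List String
  | 0, code => code
  | f + 1, code =>
    match pvScanA code with
    | some c => pvGoA f c
    | none => code

def POPPSH (code : List String) : List String := pvGoA (code.length + 1) code

-- ===== PORT B =====
-- Source B's loop body: state is (out, pending, pending_pop); pending_pop caches pending.startswith("POP")
def pvStepB (st : List String × Option String × Bool) (s : String) :
    List String × Option String × Bool :=
  if st.2.2 && PySem.Str.startswith s "PSH" then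
    (st.1 ++ [pvLod (st.2.1.getD ""), pvStr s], none, false)
  else
    ((if st.2.1.isSome then st.1 ++ [st.2.1.getD ""] else st.1),
      some s, PySem.Str.startswith s "POP")

-- Source B: fold the loop body over the input, then flush the pending line
def POPPSH_alt (code : List String) : List String :=
  let st := code.foldl pvStepB ([], none, false)
  match st.2.1 with
  | some p => st.1 ++ [p]
  | none => st.1

-- ===== PRECONDITION & SPEC =====
-- Pre_ excludes exactly the inputs on which Python A raises ValueError: an adjacent POP…/PSH…
-- pair one of whose members contains no space (j.index(" ") raises there; B raises there too).
def Pre_POPPSH (code : List String) : Prop :=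
  ∀ p ∈ code.zip code.tail,
    PySem.Str.startswith p.1 "POP" = true → PySem.Str.startswith p.2 "PSH" = true →
      (PySem.Str.find p.1 " " ≠ -1 ∧ PySem.Str.find p.2 " " ≠ -1)
instance (code : List String) : Decidable (Pre_POPPSH code) := by unfold Pre_POPPSH; infer_instance

def pvWitness_POPPSH : List String := ["POP R1", "PSH R2", "ADD R1, R2, R3"]

def Spec_POPPSH (code : List String) (out : List String) : Prop := out = POPPSH_alt code
instance (code : List String) (out : List String) : Decidable (Spec_POPPSH code out) := by unfold Spec_POPPSH; infer_instance

-- ===== CLAIM (what is proved, stated in full; the proofs are below) =====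
def Claim_equal_POPPSH : Prop := ∀ (code : List String), Dom_POPPSH code → Pre_POPPSH code → Spec_POPPSH code (POPPSH code)

-- ===== LEMMAS AND PROOFS =====

-- proof-side two-at-a-time description of the result, common reference point of both ports
def pvAlt : List String → List String
  | [] => []
  | [x] => [x]
  | x :: y :: rest =>
    if PySem.Str.startswith x "POP" && PySem.Str.startswith y "PSH" then
      pvLod x :: pvStr y :: pvAlt rest
    else x :: pvAlt (y :: rest)

def pvPopCount (code : List String) : Nat :=
  code.countP (fun s => PySem.Str.startswith s "POP")

def pvFinB (st : List String × Option String × Bool) : List String :=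
  match st.2.1 with
  | some p => st.1 ++ [p]
  | none => st.1

theorem pv_sw_iff (s p : String) :
    PySem.Str.startswith s p = true ↔ p.toList <+: s.toList := by
  rw [PySem.Str.startswith_eq]; exact PySem.Chars.startswith_iff s.toList p.toList

theorem pv_not_PSH_of_POP (s : String) (h : PySem.Str.startswith s "POP" = true) :
    PySem.Str.startswith s "PSH" = false := by
  rw [pv_sw_iff] at h
  apply Bool.eq_false_iff.mpr
  intro h2
  rw [pv_sw_iff] at h2
  have hl : ("POP".toList).length ≤ ("PSH".toList).length := by decide
  have := (List.prefix_of_prefix_length_le h h2 hl).eq_of_length (by decide)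
  simp at this

theorem pv_lod_not_POP (j : String) : PySem.Str.startswith (pvLod j) "POP" = false := by
  apply Bool.eq_false_iff.mpr
  intro h
  rw [pv_sw_iff] at h
  simp [pvLod, String.toList_append] at h

theorem pv_lod_not_PSH (j : String) : PySem.Str.startswith (pvLod j) "PSH" = false := by
  apply Bool.eq_false_iff.mpr
  intro h
  rw [pv_sw_iff] at h
  simp [pvLod, String.toList_append] at h

theorem pv_str_not_POP (j : String) : PySem.Str.startswith (pvStr j) "POP" = false := by
  apply Bool.eq_false_iff.mpr
  intro h
  rw [pv_sw_iff] at h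
  simp [pvStr, String.toList_append] at h

-- one cons step of the two-at-a-time description when the pair at the front does not match
theorem pv_alt_cons (x : String) (l : List String)
    (h : (PySem.Str.startswith x "POP" && PySem.Str.startswith l.headI "PSH") = false) :
    pvAlt (x :: l) = x :: pvAlt l := by
  cases l with
  | nil => rfl
  | cons y r =>
    have h' : (PySem.Str.startswith x "POP" && PySem.Str.startswith y "PSH") = false := h
    rw [pvAlt, if_neg (by rw [h']; exact Bool.false_ne_true)]

-- ---- A's side: find-and-replace-then-restart computes pvAlt ----

theorem pv_scan_none (code : List String) (h : pvScanA code = none) :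
    pvAlt code = code := by
  induction code using pvScanA.induct with
  | case1 => rfl
  | case2 x => rfl
  | case3 x y rest hcond =>
    rw [pvScanA, if_pos hcond] at h
    simp at h
  | case4 x y rest hcond ih =>
    rw [pvScanA, if_neg hcond] at h
    rw [Option.map_eq_none_iff] at h
    rw [pv_alt_cons x (y :: rest) (Bool.eq_false_iff.mpr hcond), ih h]

theorem pv_scan_some (code c : List String) (h : pvScanA code = some c) :
    pvAlt code = pvAlt c ∧ pvPopCount c < pvPopCount code ∧
      PySem.Str.startswith c.headI "PSH" = PySem.Str.startswith code.headI "PSH" := by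
  induction code using pvScanA.induct generalizing c with
  | case1 => simp [pvScanA] at h
  | case2 x => simp [pvScanA] at h
  | case3 x y rest hcond =>
    rw [pvScanA, if_pos hcond] at h
    obtain ⟨hx, hy⟩ := Bool.and_eq_true_iff.mp hcond
    obtain rfl : pvLod x :: pvStr y :: rest = c := by simpa using h
    refine ⟨?_, ?_, ?_⟩
    · rw [pvAlt, if_pos hcond]
      rw [pv_alt_cons (pvLod x) _ (by rw [pv_lod_not_POP, Bool.false_and])]
      rw [pv_alt_cons (pvStr y) _ (by rw [pv_str_not_POP, Bool.false_and])]
    · simp only [pvPopCount, List.countP_cons, pv_lod_not_POP, pv_str_not_POP, hx]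
      cases hy' : PySem.Str.startswith y "POP" <;> simp
    · show PySem.Str.startswith (pvLod x) "PSH" = PySem.Str.startswith x "PSH"
      rw [pv_lod_not_PSH, pv_not_PSH_of_POP x hx]
  | case4 x y rest hcond ih =>
    rw [pvScanA, if_neg hcond] at h
    rw [Option.map_eq_some_iff] at h
    obtain ⟨c', hc', rfl⟩ := h
    obtain ⟨heq, hcount, hhead⟩ := ih c' hc'
    have hhead' : (PySem.Str.startswith x "POP" && PySem.Str.startswith c'.headI "PSH") = false := by
      have hy : PySem.Str.startswith c'.headI "PSH" = PySem.Str.startswith y "PSH" := hhead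
      rw [hy]
      exact Bool.eq_false_iff.mpr hcond
    refine ⟨?_, ?_, ?_⟩
    · rw [pv_alt_cons x (y :: rest) (Bool.eq_false_iff.mpr hcond),
        pv_alt_cons x c' hhead', heq]
    · simp only [pvPopCount, List.countP_cons] at hcount ⊢
      omega
    · rfl

theorem pvGoA_eq_alt (f : Nat) (code : List String) (h : pvPopCount code < f) :
    pvGoA f code = pvAlt code := by
  induction f generalizing code with
  | zero => omega
  | succ f ih =>
    cases hs : pvScanA code with
    | none => rw [pvGoA, hs]; exact (pv_scan_none code hs).symm
    | some c =>
      obtain ⟨heq, hcount, _⟩ := pv_scan_some code c hs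
      rw [pvGoA, hs]
      show pvGoA f c = pvAlt code
      rw [ih c (by omega), heq]

-- ---- B's side: the fold with a pending line computes pvAlt ----

theorem pv_fold_inv (l : List String) :
    (∀ (out : List String) (a : String),
        pvFinB (l.foldl pvStepB (out, some a, PySem.Str.startswith a "POP"))
          = out ++ pvAlt (a :: l)) ∧
    (∀ out : List String,
        pvFinB (l.foldl pvStepB (out, none, false)) = out ++ pvAlt l) := by
  induction l with
  | nil => exact ⟨fun out a => rfl, fun out => by simp [pvFinB, pvAlt]⟩
  | cons s rest ih =>
    constructor
    · intro out a
      rw [List.foldl_cons]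
      cases hc : PySem.Str.startswith a "POP" && PySem.Str.startswith s "PSH" with
      | true =>
        have hstep : pvStepB (out, some a, PySem.Str.startswith a "POP") s
            = (out ++ [pvLod a, pvStr s], none, false) := by
          unfold pvStepB
          rw [if_pos (show ((out, some a, PySem.Str.startswith a "POP").2.2
            && PySem.Str.startswith s "PSH") = true from hc)]
          rfl
        rw [hstep, ih.2, pvAlt, if_pos hc]
        simp
      | false =>
        have hstep : pvStepB (out, some a, PySem.Str.startswith a "POP") s
            = (out ++ [a], some s, PySem.Str.startswith s "POP") := by
          unfold pvStepB
          rw [if_neg (Bool.eq_false_iff.mp (show ((out, some a, PySem.Str.startswith a "POP").2.2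
            && PySem.Str.startswith s "PSH") = false from hc))]
          rfl
        rw [hstep, ih.1, pv_alt_cons a (s :: rest) hc]
        simp
    · intro out
      have hstep : pvStepB (out, none, false) s
          = (out, some s, PySem.Str.startswith s "POP") := by
        simp [pvStepB]
      rw [List.foldl_cons, hstep, ih.1]

-- ===== VERDICT (by name: the statement is the Claim_ definition above) =====
theorem POPPSH_spec : Claim_equal_POPPSH := by
  intro code _ _
  show pvGoA (code.length + 1) code = POPPSH_alt code
  have hB : POPPSH_alt code = pvAlt code := by
    have := (pv_fold_inv code).2 []
    simpa [POPPSH_alt, pvFinB] using this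
  rw [hB]
  exact pvGoA_eq_alt _ code (Nat.lt_succ_of_le List.countP_le_length)
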